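-- pv_equiv track=rewrite | github.com/manimanis/4T_2021 | codes/chapitre04/Plagiat1.py | supp_espaces
-- ===== SOURCE A (Python) =====
-- def supp_espaces(ch):
--     ch1 = ""
--     espace = False
--     for i in range(len(ch)):
--         if ch[i] == " ":
--             if len(ch1) != 0 and ch1[-1] != " ":
--                 espace = True
--         else:
--             if espace:
--                 if ch[i] != '.':
--                     ch1 += " "
--                 espace = False
--             ch1 += ch[i]
--     return ch1
-- ===== SOURCE B (Python) =====
-- def supp_espaces(ch):
--     words = [w for w in ch.split(' ') if w]
--     out = ""
--     for w in words:
--         if out and not w.startswith('.'):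
--             out += " "
--         out += w
--     return out
-- ===== Notes on version B (the rewrite author's own statement) =====
-- stated objective: faster
-- what changed: Replaces the per-character state machine (espace flag, lookback at ch1[-1]) with a tokenize-then-join pass: split on single spaces, drop empty tokens, and join with one space except before dot-initial tokens.
import Mathlib
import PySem

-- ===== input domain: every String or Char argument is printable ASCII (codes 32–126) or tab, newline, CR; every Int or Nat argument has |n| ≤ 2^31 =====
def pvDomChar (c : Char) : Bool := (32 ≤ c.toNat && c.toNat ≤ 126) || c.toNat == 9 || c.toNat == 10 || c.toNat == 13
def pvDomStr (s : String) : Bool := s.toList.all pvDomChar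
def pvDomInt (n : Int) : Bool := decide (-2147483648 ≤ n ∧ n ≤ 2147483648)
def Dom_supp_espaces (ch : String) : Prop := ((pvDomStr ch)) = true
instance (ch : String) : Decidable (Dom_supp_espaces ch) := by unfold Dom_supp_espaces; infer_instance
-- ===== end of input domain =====

-- B replaces A's per-character state machine with a tokenize-then-join pass (split on ' ',
-- drop empty tokens, join with a space except before tokens starting with '.'); idiomatic rewrite.

-- ===== PORT A =====
-- one loop step of A: state = (ch1, espace)
def pvStepA (s : List Char × Bool) (c : Char) : List Char × Bool :=
  if c = ' ' then
    if s.1.length ≠ 0 ∧ PySem.List.pyGet? s.1 (-1) ≠ some ' ' then (s.1, true) else s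
  else
    if s.2 = true then
      ((if c ≠ '.' then s.1 ++ [' '] else s.1) ++ [c], false)
    else
      (s.1 ++ [c], s.2)

def supp_espaces (ch : String) : String :=
  String.ofList ((ch.toList.foldl pvStepA ([], false)).1)

-- ===== PORT B =====
-- one loop step of B: out += maybe-separator + w
def pvStepB (out : List Char) (w : List Char) : List Char :=
  (if out ≠ [] ∧ PySem.Chars.startswith w ['.'] = false then out ++ [' '] else out) ++ w

def supp_espaces_alt (ch : String) : String :=
  String.ofList
    (((PySem.Chars.splitOn ch.toList [' ']).filter (fun w => !w.isEmpty)).foldl pvStepB [])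

-- ===== PRECONDITION & SPEC =====
def Spec_supp_espaces (ch : String) (out : String) : Prop := out = supp_espaces_alt ch
instance (ch : String) (out : String) : Decidable (Spec_supp_espaces ch out) := by unfold Spec_supp_espaces; infer_instance

-- ===== CLAIM (what is proved, stated in full; the proofs are below) =====
def Claim_equal_supp_espaces : Prop := ∀ (ch : String), Dom_supp_espaces ch → Spec_supp_espaces ch (supp_espaces ch)

-- ===== LEMMAS AND PROOFS =====

-- recursive characterization of str.split(' ') (single-char separator)
def pvMySplit (pre : List Char) : List Char → List (List Char)
  | [] => [pre]
  | c :: t => if c = ' ' then pre :: pvMySplit [] t else pvMySplit (pre ++ [c]) t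

lemma pv_go_spec (fuel : Nat) : ∀ (l cur : List Char) (_ : l.length < fuel) (accs : List (List Char)),
    PySem.Chars.splitOn.go [' '] fuel l cur accs = accs.reverse ++ pvMySplit cur.reverse l := by
  induction fuel with
  | zero => intro l cur h; omega
  | succ f ih =>
    intro l cur h accs
    cases l with
    | nil => simp [PySem.Chars.splitOn.go, pvMySplit]
    | cons c rest =>
      by_cases hc : c = ' '
      · subst hc
        have hpre : [' '].isPrefixOf (' ' :: rest) = true := by simp [List.isPrefixOf]
        simp only [PySem.Chars.splitOn.go, hpre, if_true]
        rw [show List.drop [' '].length (' ' :: rest) = rest by simp]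
        rw [ih rest [] (by simpa using Nat.lt_of_succ_lt_succ h)]
        simp [pvMySplit]
      · have hpre : [' '].isPrefixOf (c :: rest) = false := by
          simp [List.isPrefixOf]
          exact fun h' => hc h'.symm
        simp only [PySem.Chars.splitOn.go, hpre, Bool.false_eq_true, if_false]
        rw [ih rest (c :: cur) (by simpa using Nat.lt_of_succ_lt_succ h)]
        simp [pvMySplit, hc]

lemma pv_splitOn_eq (l : List Char) : PySem.Chars.splitOn l [' '] = pvMySplit [] l := by
  unfold PySem.Chars.splitOn
  rw [pv_go_spec (l.length + 1) l [] (by omega)]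
  simp

-- the nonempty tokens of l
def pvWords (l : List Char) : List (List Char) :=
  (pvMySplit [] l).filter (fun w => !w.isEmpty)

lemma pvMySplit_all (t : List Char) : ∀ pre, t.dropWhile (· ≠ ' ') = [] →
    pvMySplit pre t = [pre ++ t] := by
  induction t with
  | nil => intro pre _; simp [pvMySplit]
  | cons c r ih =>
    intro pre h
    by_cases hc : c = ' '
    · simp [List.dropWhile, hc] at h
    · simp only [List.dropWhile, ne_eq, hc, not_false_eq_true, decide_true] at h
      simp only [pvMySplit, hc, if_false]
      rw [ih (pre ++ [c]) h]
      simp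

lemma pvMySplit_break (t : List Char) : ∀ pre x d, t.dropWhile (· ≠ ' ') = x :: d →
    pvMySplit pre t = (pre ++ t.takeWhile (· ≠ ' ')) :: pvMySplit [] d := by
  induction t with
  | nil => intro pre x d h; simp [List.dropWhile] at h
  | cons c r ih =>
    intro pre x d h
    by_cases hc : c = ' '
    · subst hc
      simp only [List.dropWhile, ne_eq, not_true_eq_false, decide_false] at h
      cases h
      simp [pvMySplit, List.takeWhile]
    · simp only [List.dropWhile, ne_eq, hc, not_false_eq_true, decide_true] at h
      simp only [pvMySplit, hc, if_false]
      rw [ih (pre ++ [c]) x d h]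
      simp [List.takeWhile, hc]

lemma pv_dropWhile_head {p : Char → Bool} : ∀ {t : List Char} {x : Char} {d : List Char},
    t.dropWhile p = x :: d → p x = false := by
  intro t
  induction t with
  | nil => intro x d h; simp [List.dropWhile] at h
  | cons c r ih =>
    intro x d h
    by_cases hc : p c
    · rw [List.dropWhile_cons_of_pos hc] at h
      exact ih h
    · rw [List.dropWhile_cons_of_neg hc] at h
      cases h
      simpa using hc

lemma pvWords_nil : pvWords [] = [] := by simp [pvWords, pvMySplit]

lemma pvWords_space (t : List Char) : pvWords (' ' :: t) = pvWords t := by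
  simp [pvWords, pvMySplit]

lemma pvWords_cons (c : Char) (t : List Char) (hc : c ≠ ' ') :
    pvWords (c :: t) = (c :: t.takeWhile (· ≠ ' ')) :: pvWords (t.dropWhile (· ≠ ' ')) := by
  have hstep : pvMySplit [] (c :: t) = pvMySplit [c] t := by simp [pvMySplit, hc]
  cases h : t.dropWhile (· ≠ ' ') with
  | nil =>
    have ht : t.takeWhile (· ≠ ' ') = t := by
      conv_rhs => rw [← List.takeWhile_append_dropWhile (p := (· ≠ ' ')) (l := t)]
      rw [h, List.append_nil]
    simp only [pvWords, hstep, pvMySplit_all t [c] h, ht]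
    simp [pvMySplit]
  | cons x d =>
    have hx : x = ' ' := by simpa using pv_dropWhile_head h
    subst hx
    have h1 : pvWords (c :: t) = (c :: t.takeWhile (· ≠ ' ')) :: (pvMySplit [] d).filter (fun w => !w.isEmpty) := by
      unfold pvWords
      rw [hstep, pvMySplit_break t [c] ' ' d h]
      simp
    rw [h1, pvWords_space]
    rfl

lemma pv_pyGet_neg_one (l : List Char) : PySem.List.pyGet? l (-1) = l.getLast? := by
  cases l with
  | nil => simp [PySem.List.pyGet?, PySem.List.pyIdx?]
  | cons c t =>
    simp [PySem.List.pyGet?, PySem.List.pyIdx?, List.getLast?_eq_getElem?]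

-- A's machine, over a space-free word with espace clear, just appends it
lemma pv_mid (w : List Char) : ∀ (t : List Char) (acc : List Char), (∀ x ∈ w, x ≠ ' ') →
    List.foldl pvStepA (acc, false) (w ++ t) = List.foldl pvStepA (acc ++ w, false) t := by
  induction w with
  | nil => intro t acc _; simp
  | cons x w ih =>
    intro t acc h
    have hx : x ≠ ' ' := h x (by simp)
    simp only [List.cons_append, List.foldl_cons]
    have hs : pvStepA (acc, false) x = (acc ++ [x], false) := by
      simp [pvStepA, hx]
    rw [hs, ih t (acc ++ [x]) (fun y hy => h y (by simp [hy]))]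
    simp

lemma pv_last_word (c : Char) (w : List Char) (hc : c ≠ ' ') (hw : ∀ x ∈ w, x ≠ ' ') :
    (c :: w).getLast? ≠ some ' ' := by
  have hmem : (c :: w).getLast (by simp) ∈ c :: w := List.getLast_mem _
  rw [List.getLast?_eq_some_getLast (l := c :: w) (by simp)]
  intro hcon
  have : (c :: w).getLast (by simp) = ' ' := by simpa using hcon
  rw [this] at hmem
  rcases List.mem_cons.mp hmem with h1 | h1
  · exact hc h1.symm
  · exact hw _ h1 rfl

lemma pv_step_space (acc : List Char) (e : Bool) (hacc : acc ≠ [])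
    (hlast : acc.getLast? ≠ some ' ') : pvStepA (acc, e) ' ' = (acc, true) := by
  simp [pvStepA, pv_pyGet_neg_one, hlast, hacc]

lemma pv_stepB_cons (acc : List Char) (c : Char) (w : List Char) (hacc : acc ≠ []) :
    pvStepB acc (c :: w) = ((if c ≠ '.' then acc ++ [' '] else acc) ++ [c]) ++ w := by
  by_cases hd : c = '.'
  · subst hd
    simp [pvStepB, PySem.Chars.startswith, List.isPrefixOf]
  · have : PySem.Chars.startswith (c :: w) ['.'] = false := by
      simp [PySem.Chars.startswith, List.isPrefixOf]
      exact fun h => hd h.symm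
    simp [pvStepB, this, hacc, hd]

lemma pvMain : ∀ (n : Nat) (l acc : List Char), l.length ≤ n → acc ≠ [] →
    acc.getLast? ≠ some ' ' →
    (List.foldl pvStepA (acc, true) l).1 = List.foldl pvStepB acc (pvWords l) := by
  intro n
  induction n with
  | zero =>
    intro l acc hl _ _
    have : l = [] := List.eq_nil_of_length_eq_zero (Nat.le_zero.mp hl)
    subst this
    simp [pvWords_nil]
  | succ n ih =>
    intro l acc hl hacc hlast
    cases l with
    | nil => simp [pvWords_nil]
    | cons c t =>
      by_cases hc : c = ' '
      · subst hc
        simp only [List.foldl_cons, pv_step_space acc true hacc hlast, pvWords_space]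
        exact ih t acc (by simpa using Nat.le_of_succ_le_succ hl) hacc hlast
      · set w := t.takeWhile (· ≠ ' ') with hwdef
        set d' := t.dropWhile (· ≠ ' ') with hddef
        have hw : ∀ x ∈ w, x ≠ ' ' := fun x hx => by
          simpa using List.mem_takeWhile_imp hx
        have htw : t = w ++ d' := (List.takeWhile_append_dropWhile).symm
        have hstep : pvStepA (acc, true) c = ((if c ≠ '.' then acc ++ [' '] else acc) ++ [c], false) := by
          simp [pvStepA, hc]
        set acc1 := (if c ≠ '.' then acc ++ [' '] else acc) ++ [c] with hacc1
        have hsplit : acc1 ++ w = (if c ≠ '.' then acc ++ [' '] else acc) ++ (c :: w) := by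
          simp [hacc1]
        have hBs : pvStepB acc (c :: w) = acc1 ++ w := pv_stepB_cons acc c w hacc
        rw [List.foldl_cons, hstep, pvWords_cons c t hc, List.foldl_cons, hBs, ← hddef]
        conv_lhs => rw [htw]
        rw [pv_mid w d' acc1 hw]
        have hlast1 : (acc1 ++ w).getLast? ≠ some ' ' := by
          rw [hsplit, List.getLast?_append]
          have h1 := pv_last_word c w hc hw
          cases h2 : (c :: w).getLast? with
          | none => simp [List.getLast?_eq_none_iff] at h2
          | some y =>
            rw [h2] at h1
            simpa using h1
        have hne1 : acc1 ++ w ≠ [] := by simp [hsplit]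
        cases hd : d' with
        | nil => simp [pvWords_nil]
        | cons x d =>
          have hx : x = ' ' := by
            have h0 : t.dropWhile (· ≠ ' ') = x :: d := by rw [← hddef, hd]
            simpa using pv_dropWhile_head h0
          subst hx
          rw [List.foldl_cons, pv_step_space (acc1 ++ w) false hne1 hlast1, pvWords_space]
          have hdlen : d.length ≤ n := by
            have h1 : d'.length ≤ t.length := by
              rw [hddef]; exact List.length_dropWhile_le _ _
            rw [hd] at h1
            simp only [List.length_cons] at h1 hl
            omega
          exact ih d (acc1 ++ w) hdlen hne1 hlast1

lemma pvStart : ∀ (n : Nat) (l : List Char), l.length ≤ n →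
    (List.foldl pvStepA (([] : List Char), false) l).1 = List.foldl pvStepB [] (pvWords l) := by
  intro n
  induction n with
  | zero =>
    intro l hl
    have : l = [] := List.eq_nil_of_length_eq_zero (Nat.le_zero.mp hl)
    subst this
    simp [pvWords_nil]
  | succ n ih =>
    intro l hl
    cases l with
    | nil => simp [pvWords_nil]
    | cons c t =>
      by_cases hc : c = ' '
      · subst hc
        have hs : pvStepA (([] : List Char), false) ' ' = ([], false) := by
          simp [pvStepA]
        rw [List.foldl_cons, hs, pvWords_space]
        exact ih t (by simpa using Nat.le_of_succ_le_succ hl)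
      · set w := t.takeWhile (· ≠ ' ') with hwdef
        set d' := t.dropWhile (· ≠ ' ') with hddef
        have hw : ∀ x ∈ w, x ≠ ' ' := fun x hx => by
          simpa using List.mem_takeWhile_imp hx
        have htw : t = w ++ d' := (List.takeWhile_append_dropWhile).symm
        have hstep : pvStepA (([] : List Char), false) c = ([c], false) := by
          simp [pvStepA, hc]
        have hBs : pvStepB [] (c :: w) = c :: w := by simp [pvStepB]
        rw [List.foldl_cons, hstep, pvWords_cons c t hc, List.foldl_cons, hBs, ← hddef]
        conv_lhs => rw [htw]
        rw [show ([c] : List Char) = [] ++ [c] by simp] at *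
        rw [pv_mid w d' ([] ++ [c]) hw]
        have hmerge : ([] : List Char) ++ [c] ++ w = c :: w := by simp
        rw [hmerge]
        have hlast1 : (c :: w).getLast? ≠ some ' ' := pv_last_word c w hc hw
        cases hd : d' with
        | nil => simp [pvWords_nil]
        | cons x d =>
          have hx : x = ' ' := by
            have h0 : t.dropWhile (· ≠ ' ') = x :: d := by rw [← hddef, hd]
            simpa using pv_dropWhile_head h0
          subst hx
          rw [List.foldl_cons, pv_step_space (c :: w) false (by simp) hlast1, pvWords_space]
          have hdlen : d.length ≤ n := by
            have h1 : d'.length ≤ t.length := by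
              rw [hddef]; exact List.length_dropWhile_le _ _
            rw [hd] at h1
            simp only [List.length_cons] at h1 hl
            omega
          exact pvMain n d (c :: w) hdlen (by simp) hlast1

-- ===== VERDICT (by name: the statement is the Claim_ definition above) =====
theorem supp_espaces_spec : Claim_equal_supp_espaces := by
  intro ch _
  unfold Spec_supp_espaces supp_espaces supp_espaces_alt
  rw [pv_splitOn_eq]
  exact congrArg String.ofList (pvStart ch.toList.length ch.toList le_rfl)
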